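-- pv_equiv track=rewrite | github.com/bkazemi/shakar | src/shakar_ref/types.py | _format_places
-- ===== SOURCE A (Python) =====
-- import math
-- from typing import (
--     Any,
--     Callable,
--     Deque,
--     Dict,
--     FrozenSet,
--     List,
--     Literal,
--     NamedTuple,
--     Optional,
--     Tuple,
--     TypeVar,
--     Union,
--     TYPE_CHECKING,
-- )
--
-- MAX_REPEATING_FRACTION_DIGITS = 20
--
-- def _has_terminating_decimal(remainder: int, per_unit: int) -> bool:
--     """Check whether remainder/per_unit has a finite decimal expansion."""
--     denominator = per_unit // math.gcd(remainder, per_unit)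
--
--     while denominator % 2 == 0:
--         denominator //= 2
--     while denominator % 5 == 0:
--         denominator //= 5
--
--     return denominator == 1
--
-- def _format_single(abs_val: int, unit: str, per_unit: int) -> str:
--     """Format a non-negative value with a single unit."""
--     if per_unit == 1:
--         return f"{abs_val}{unit}"
--
--     whole, remainder = divmod(abs_val, per_unit)
--     if remainder == 0:
--         return f"{whole}{unit}"
--
--     # Exact rational formatting using integer long-division.
--     # For terminating decimals, emit the full exact expansion.
--     # For repeating decimals, cap output to keep rendering bounded.
--     frac_digits: List[str] = []
--     r = remainder
--     if _has_terminating_decimal(remainder, per_unit):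
--         while r:
--             r *= 10
--             d, r = divmod(r, per_unit)
--             frac_digits.append(str(d))
--     else:
--         for _ in range(MAX_REPEATING_FRACTION_DIGITS):
--             r *= 10
--             d, r = divmod(r, per_unit)
--             frac_digits.append(str(d))
--             if r == 0:
--                 break
--
--     # Preserve literal shape for very tiny values in large units.
--     frac = "".join(frac_digits) or "0"
--     return f"{whole}.{frac}{unit}"
--
-- def _format_places(
--     abs_val: int,
--     places: Tuple[str, ...],
--     unit_map: Dict[str, int],
-- ) -> str:
--     """Decompose a non-negative value across ordered unit places.
--     Places are ordered largest-first. Zero-valued places are omitted.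
--     The last place absorbs the remainder (possibly fractional)."""
--     if len(places) == 1:
--         single = places[0]
--         return _format_single(abs_val, single, unit_map[single])
--
--     # Compound literals require integer components. If the tail would be
--     # fractional in the smallest stored place, render as a single-unit value.
--     tail = abs_val
--     for u in places[:-1]:
--         _, tail = divmod(tail, unit_map[u])
--     smallest_per = unit_map[places[-1]]
--     if tail % smallest_per != 0:
--         primary = places[0]
--         return _format_single(abs_val, primary, unit_map[primary])
--
--     parts: List[str] = []
--     remaining = abs_val
--     for i, u in enumerate(places):
--         per = unit_map[u]
--         if i < len(places) - 1:
--             count, remaining = divmod(remaining, per)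
--             if count:
--                 parts.append(f"{count}{u}")
--         else:
--             # Last place absorbs whatever is left
--             if remaining or not parts:
--                 count, _ = divmod(remaining, per)
--                 parts.append(f"{count}{u}")
--
--     return "".join(parts)
-- ===== SOURCE B (Python) =====
-- import math
-- from typing import Dict, List, Tuple
--
-- MAX_REPEATING_FRACTION_DIGITS = 20
--
-- def _has_terminating_decimal(remainder: int, per_unit: int) -> bool:
--     denominator = per_unit // math.gcd(remainder, per_unit)
--     while denominator % 2 == 0:
--         denominator //= 2
--     while denominator % 5 == 0:
--         denominator //= 5
--     return denominator == 1
--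
-- def _format_single(abs_val: int, unit: str, per_unit: int) -> str:
--     if per_unit == 1:
--         return f"{abs_val}{unit}"
--     whole, remainder = divmod(abs_val, per_unit)
--     if remainder == 0:
--         return f"{whole}{unit}"
--     frac_digits: List[str] = []
--     r = remainder
--     if _has_terminating_decimal(remainder, per_unit):
--         while r:
--             r *= 10
--             d, r = divmod(r, per_unit)
--             frac_digits.append(str(d))
--     else:
--         for _ in range(MAX_REPEATING_FRACTION_DIGITS):
--             r *= 10
--             d, r = divmod(r, per_unit)
--             frac_digits.append(str(d))
--             if r == 0:
--                 break
--     frac = "".join(frac_digits) or "0"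
--     return f"{whole}.{frac}{unit}"
--
-- def _format_places(
--     abs_val: int,
--     places: Tuple[str, ...],
--     unit_map: Dict[str, int],
-- ) -> str:
--     """Single pass over the places: build the parts while computing the
--     running remainder, then decide fallback/last-place at the end."""
--     if len(places) == 1:
--         single = places[0]
--         return _format_single(abs_val, single, unit_map[single])
--
--     parts: List[str] = []
--     remaining = abs_val
--     for u in places[:-1]:
--         count, remaining = divmod(remaining, unit_map[u])
--         if count:
--             parts.append(f"{count}{u}")
--
--     last = places[-1]
--     per = unit_map[last]
--     if remaining % per != 0:
--         first = places[0]
--         return _format_single(abs_val, first, unit_map[first])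
--
--     if remaining or not parts:
--         parts.append(f"{remaining // per}{last}")
--     return "".join(parts)
-- ===== Notes on version B (the rewrite author's own statement) =====
-- stated objective: simpler
-- what changed: A scans the places twice (a pre-loop recomputing the running remainder just to test the fractional-tail fallback, then a full enumerate loop rebuilding the same remainder chain while collecting parts); B makes one pass over places[:-1] collecting parts and the remainder together, then decides fallback and the last place afterwards.
import Mathlib
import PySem

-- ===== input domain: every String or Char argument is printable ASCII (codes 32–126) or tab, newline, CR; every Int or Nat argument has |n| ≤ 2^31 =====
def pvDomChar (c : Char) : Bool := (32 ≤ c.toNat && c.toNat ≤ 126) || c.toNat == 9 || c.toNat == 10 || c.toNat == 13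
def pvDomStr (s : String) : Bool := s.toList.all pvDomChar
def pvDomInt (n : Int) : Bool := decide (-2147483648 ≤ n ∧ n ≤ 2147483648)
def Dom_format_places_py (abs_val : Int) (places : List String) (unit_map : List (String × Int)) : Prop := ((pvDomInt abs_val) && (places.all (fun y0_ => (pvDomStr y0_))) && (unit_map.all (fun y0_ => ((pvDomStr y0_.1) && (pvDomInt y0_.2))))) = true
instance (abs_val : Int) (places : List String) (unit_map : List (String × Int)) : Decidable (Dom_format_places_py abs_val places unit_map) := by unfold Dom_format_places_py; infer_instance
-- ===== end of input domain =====

-- B replaces A's two scans over the places (one computing the tail remainder, one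
-- rebuilding the very same remainder chain while collecting parts) by ONE pass that
-- collects parts and the running remainder together, deciding fallback/last place after it.

-- ===== PORT A =====
-- shared helpers: total form of `unit_map[u]` (first match; KeyError / a zero divisor
-- is excluded by Pre_, so the default 0 is never the value actually claimed about)
def pvLookup (unit_map : List (String × Int)) (u : String) : Int :=
  (((unit_map.find? (fun p => p.1 == u)).map Prod.snd).getD 0)

-- `while denominator % p == 0: denominator //= p` — fueled; |denominator| ≤ 2^31 on Dom,
-- and denominator ≠ 0 there (Pre_ gives per_unit ≠ 0), so 64 halvings always suffice.
def pvStrip : Nat → Int → Int → Int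
  | 0, d, _ => d
  | fuel + 1, d, p =>
      if PySem.Int.mod d p == 0 then pvStrip fuel (PySem.Int.floordiv d p) p else d

def pvHasTermDec (remainder per_unit : Int) : Bool :=
  let denominator := PySem.Int.floordiv per_unit (Int.gcd remainder per_unit)
  pvStrip 64 (pvStrip 64 denominator 2) 5 == 1

-- `while r: r *= 10; d, r = divmod(r, per_unit); append str(d)` — fueled; on Dom the
-- terminating branch needs at most max(pow2,pow5) ≤ 31 digits, so fuel 64 is exact there.
def pvFracT : Nat → Int → Int → List String → List String
  | 0, _, _, acc => acc
  | fuel + 1, r, per_unit, acc =>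
      if r == 0 then acc
      else
        let r10 := r * 10
        pvFracT fuel (PySem.Int.mod r10 per_unit) per_unit
          (acc ++ [PySem.Int.toStr (PySem.Int.floordiv r10 per_unit)])

-- `for _ in range(20): … if r == 0: break` — the bound 20 is Python's own
def pvFracR : Nat → Int → Int → List String → List String
  | 0, _, _, acc => acc
  | fuel + 1, r, per_unit, acc =>
      let r10 := r * 10
      let r' := PySem.Int.mod r10 per_unit
      let acc' := acc ++ [PySem.Int.toStr (PySem.Int.floordiv r10 per_unit)]
      if r' == 0 then acc' else pvFracR fuel r' per_unit acc'

def pvFormatSingle (abs_val : Int) (unit : String) (per_unit : Int) : String :=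
  if per_unit == 1 then PySem.Int.toStr abs_val ++ unit
  else
    let whole := PySem.Int.floordiv abs_val per_unit
    let remainder := PySem.Int.mod abs_val per_unit
    if remainder == 0 then PySem.Int.toStr whole ++ unit
    else
      let frac_digits :=
        if pvHasTermDec remainder per_unit then pvFracT 64 remainder per_unit []
        else pvFracR 20 remainder per_unit []
      let frac := if PySem.Str.join "" frac_digits == "" then "0" else PySem.Str.join "" frac_digits
      PySem.Int.toStr whole ++ "." ++ frac ++ unit

def format_places_py (abs_val : Int) (places : List String) (unit_map : List (String × Int)) : String :=
  if places.length == 1 then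
    let single := (PySem.List.pyGet? places 0).getD ""
    pvFormatSingle abs_val single (pvLookup unit_map single)
  else
    let tail := (PySem.List.slice places none (some (-1))).foldl
      (fun t u => PySem.Int.mod t (pvLookup unit_map u)) abs_val
    let smallest_per := pvLookup unit_map ((PySem.List.pyGet? places (-1)).getD "")
    if PySem.Int.mod tail smallest_per != 0 then
      let primary := (PySem.List.pyGet? places 0).getD ""
      pvFormatSingle abs_val primary (pvLookup unit_map primary)
    else
      let res := (PySem.List.enumerate places 0).foldl
        (fun (st : List String × Int) iu =>
          let per := pvLookup unit_map iu.2
          if iu.1 < PySem.List.len places - 1 then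
            let count := PySem.Int.floordiv st.2 per
            ((if count != 0 then st.1 ++ [PySem.Int.toStr count ++ iu.2] else st.1),
             PySem.Int.mod st.2 per)
          else
            if st.2 != 0 || st.1.isEmpty then
              (st.1 ++ [PySem.Int.toStr (PySem.Int.floordiv st.2 per) ++ iu.2], st.2)
            else st) ([], abs_val)
      PySem.Str.join "" res.1

-- ===== PORT B =====
def format_places_py_alt (abs_val : Int) (places : List String) (unit_map : List (String × Int)) : String :=
  if places.length == 1 then
    let single := (PySem.List.pyGet? places 0).getD ""
    pvFormatSingle abs_val single (pvLookup unit_map single)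
  else
    let st := (PySem.List.slice places none (some (-1))).foldl
      (fun (st : List String × Int) u =>
        let per := pvLookup unit_map u
        let count := PySem.Int.floordiv st.2 per
        ((if count != 0 then st.1 ++ [PySem.Int.toStr count ++ u] else st.1),
         PySem.Int.mod st.2 per)) ([], abs_val)
    let last := (PySem.List.pyGet? places (-1)).getD ""
    let per := pvLookup unit_map last
    if PySem.Int.mod st.2 per != 0 then
      let first := (PySem.List.pyGet? places 0).getD ""
      pvFormatSingle abs_val first (pvLookup unit_map first)
    else
      let parts :=
        if st.2 != 0 || st.1.isEmpty then
          st.1 ++ [PySem.Int.toStr (PySem.Int.floordiv st.2 per) ++ last]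
        else st.1
      PySem.Str.join "" parts

-- ===== PRECONDITION & SPEC =====
-- Pre_ = exactly the inputs on which the Python A returns: places non-empty (else
-- places[-1] raises IndexError) and every place a key of unit_map with a non-zero
-- value (else KeyError / ZeroDivisionError).
def Pre_format_places_py (abs_val : Int) (places : List String) (unit_map : List (String × Int)) : Prop :=
  places ≠ [] ∧ ∀ u ∈ places, (((unit_map.find? (fun p => p.1 == u)).map Prod.snd).getD 0) ≠ 0
instance (abs_val : Int) (places : List String) (unit_map : List (String × Int)) : Decidable (Pre_format_places_py abs_val places unit_map) := by unfold Pre_format_places_py; infer_instance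

def pvWitness_format_places_py : Int × List String × (List (String × Int)) :=
  (7381, ["h", "m", "s"], [("h", 3600), ("m", 60), ("s", 1)])

def Spec_format_places_py (abs_val : Int) (places : List String) (unit_map : List (String × Int)) (out : String) : Prop := out = format_places_py_alt abs_val places unit_map
instance (abs_val : Int) (places : List String) (unit_map : List (String × Int)) (out : String) : Decidable (Spec_format_places_py abs_val places unit_map out) := by unfold Spec_format_places_py; infer_instance

-- ===== CLAIM (what is proved, stated in full; the proofs are below) =====
def Claim_equal_format_places_py : Prop := ∀ (abs_val : Int) (places : List String) (unit_map : List (String × Int)), Dom_format_places_py abs_val places unit_map → Pre_format_places_py abs_val places unit_map → Spec_format_places_py abs_val places unit_map (format_places_py abs_val places unit_map)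

-- ===== LEMMAS AND PROOFS =====

-- B's single loop carries the same remainder chain A's first (tail) loop computes
theorem pv_snd_foldl (unit_map : List (String × Int)) :
    ∀ (l : List String) (parts : List String) (t : Int),
      (l.foldl (fun (st : List String × Int) u =>
          let per := pvLookup unit_map u
          let count := PySem.Int.floordiv st.2 per
          ((if count != 0 then st.1 ++ [PySem.Int.toStr count ++ u] else st.1),
           PySem.Int.mod st.2 per)) (parts, t)).2
        = l.foldl (fun t u => PySem.Int.mod t (pvLookup unit_map u)) t := by
  intro l
  induction l with
  | nil => intro parts t; rfl
  | cons u rest ih =>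
      intro parts t
      simp only [List.foldl_cons]
      exact ih _ _

-- on the non-last places (index < n - 1) A's enumerate step is exactly B's step
theorem pv_enum_foldl (unit_map : List (String × Int)) (n : Int) :
    ∀ (l : List String) (k : Int) (s : List String × Int),
      0 ≤ k → k + l.length ≤ n - 1 →
      (PySem.List.enumerate l k).foldl
        (fun (st : List String × Int) iu =>
          let per := pvLookup unit_map iu.2
          if iu.1 < n - 1 then
            let count := PySem.Int.floordiv st.2 per
            ((if count != 0 then st.1 ++ [PySem.Int.toStr count ++ iu.2] else st.1),
             PySem.Int.mod st.2 per)
          else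
            if st.2 != 0 || st.1.isEmpty then
              (st.1 ++ [PySem.Int.toStr (PySem.Int.floordiv st.2 per) ++ iu.2], st.2)
            else st) s
      = l.foldl (fun (st : List String × Int) u =>
          let per := pvLookup unit_map u
          let count := PySem.Int.floordiv st.2 per
          ((if count != 0 then st.1 ++ [PySem.Int.toStr count ++ u] else st.1),
           PySem.Int.mod st.2 per)) s := by
  intro l
  induction l with
  | nil => intro k s _ _; simp [PySem.List.enumerate_nil]
  | cons u rest ih =>
      intro k s hk hle
      rw [PySem.List.enumerate_cons]
      simp only [List.foldl_cons, List.length_cons] at *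
      have hklt : k < n - 1 := by
        have : (rest.length : Int) ≥ 0 := by positivity
        omega
      rw [if_pos hklt]
      exact ih (k + 1) _ (by omega) (by push_cast at hle ⊢; omega)

-- ===== VERDICT (by name: the statement is the Claim_ definition above) =====
theorem format_places_py_spec : Claim_equal_format_places_py := by
  intro abs_val places unit_map _ hpre
  unfold Spec_format_places_py format_places_py format_places_py_alt
  by_cases h1 : places.length == 1
  · simp only [h1, if_true]
  · simp only [h1]
    obtain ⟨hne, -⟩ := hpre
    -- name the shared pieces
    rw [PySem.List.slice_to_neg_one]
    have hdec : places.dropLast ++ [places.getLast hne] = places :=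
      List.dropLast_append_getLast hne
    have htail0 := pv_snd_foldl unit_map places.dropLast [] abs_val
    rw [← htail0]
    set st := places.dropLast.foldl (fun (st : List String × Int) u =>
        let per := pvLookup unit_map u
        let count := PySem.Int.floordiv st.2 per
        ((if count != 0 then st.1 ++ [PySem.Int.toStr count ++ u] else st.1),
         PySem.Int.mod st.2 per)) ([], abs_val) with hst
    by_cases hmod : PySem.Int.mod st.2 (pvLookup unit_map ((PySem.List.pyGet? places (-1)).getD "")) != 0
    · simp only [hmod, if_true]
    · simp only [hmod]
      -- A's second loop = B's loop plus the last-place step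
      have hget : (PySem.List.pyGet? places (-1)).getD "" = places.getLast hne := by
        rw [PySem.List.pyGet?_neg_one, List.getLast?_eq_getLast_of_ne_nil hne]
        rfl
      have hlen0 : places.dropLast.length = places.length - 1 := by simp
      have h0 : 0 < places.length := List.length_pos_of_ne_nil hne
      have henum : PySem.List.enumerate places 0
          = PySem.List.enumerate places.dropLast 0
            ++ PySem.List.enumerate [places.getLast hne] (0 + places.dropLast.length) := by
        conv_lhs => rw [← hdec]
        rw [PySem.List.enumerate_append]
      rw [henum, List.foldl_append]
      rw [pv_enum_foldl unit_map (PySem.List.len places) places.dropLast 0 ([], abs_val)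
            (le_refl 0) (by rw [PySem.List.len_eq]; push_cast [hlen0]; omega)]
      rw [PySem.List.enumerate_cons, PySem.List.enumerate_nil]
      simp only [List.foldl_cons, List.foldl_nil, ← hst]
      have hnotlt : ¬ ((0 : Int) + places.dropLast.length < PySem.List.len places - 1) := by
        rw [PySem.List.len_eq]; push_cast [hlen0]; omega
      rw [if_neg hnotlt]
      rw [hget] at hmod ⊢
      by_cases happ : st.2 != 0 || st.1.isEmpty
      · simp [happ]
      · simp [happ]
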